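-- pv_equiv track=rewrite | github.com/JakobWyatt/monorepo | euler/util.py | prime_factors_sparse
-- ===== SOURCE A (Python) =====
-- def prime_factors_sparse(primes, x):
--     factors = [0] * len(primes)
--     i = 0
--     while i < len(primes):
--         p = primes[i]
--         if x % p == 0:
--             x = x // p
--             factors[i] += 1
--         else:
--             i += 1
--     return factors
-- ===== SOURCE B (Python) =====
-- def _remove(p, x):
--     # returns (e, x // p**e) where e is the multiplicity of p in x,
--     # extracting the exponent by recursive squaring of p
--     if x % p != 0:
--         return 0, x
--     e, y = _remove(p * p, x)
--     if y % p == 0: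
--         return 2 * e + 1, y // p
--     return 2 * e, y
--
--
-- def prime_factors_sparse(primes, x):
--     factors = []
--     for p in primes:
--         e, x = _remove(p, x)
--         factors.append(e)
--     return factors
-- ===== Notes on version B (the rewrite author's own statement) =====
-- stated objective: alternative
-- what changed: B extracts each prime's exponent with a recursive exponent-by-squaring helper (divide by p, p^2, p^4, ... and recombine as 2e or 2e+1), instead of A's one-division-at-a-time while loop over a manually indexed preallocated list.
import Mathlib
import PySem

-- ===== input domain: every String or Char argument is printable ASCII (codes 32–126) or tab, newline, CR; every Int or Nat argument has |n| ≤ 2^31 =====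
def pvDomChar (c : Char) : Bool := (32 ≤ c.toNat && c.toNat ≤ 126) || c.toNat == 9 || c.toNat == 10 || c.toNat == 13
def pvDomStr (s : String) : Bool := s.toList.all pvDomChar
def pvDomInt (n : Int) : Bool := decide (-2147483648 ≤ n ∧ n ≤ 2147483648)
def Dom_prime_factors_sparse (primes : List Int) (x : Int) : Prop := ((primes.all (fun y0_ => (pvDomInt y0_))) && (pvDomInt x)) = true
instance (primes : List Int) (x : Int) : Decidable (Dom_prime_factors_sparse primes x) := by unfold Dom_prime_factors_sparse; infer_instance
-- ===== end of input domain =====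

-- B extracts each prime's exponent by recursive squaring of p (divide by p, p^2, p^4, ...)
-- instead of A's one-division-at-a-time while loop over a manually indexed preallocated list.


-- ===== PORT A =====
-- A's while-loop; the dite guard |x//p| < |x| only makes the recursion total:
-- where it fails (p = 0, p = ±1 or x = 0) Python raises or diverges (outside Pre_)
def pfsLoopA (primes : List Int) (factors : List Int) (i : Nat) (x : Int) : List Int :=
  if hi : i < primes.length then
    if PySem.Int.mod x primes[i] = 0 then
      if hdec : (PySem.Int.floordiv x primes[i]).natAbs < x.natAbs then
        pfsLoopA primes (factors.modify i (· + 1)) i (PySem.Int.floordiv x primes[i])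
      else factors
    else pfsLoopA primes factors (i + 1) x
  else factors
termination_by (primes.length - i) + x.natAbs
decreasing_by
  · omega
  · omega

def prime_factors_sparse (primes : List Int) (x : Int) : List Int :=
  pfsLoopA primes (List.replicate primes.length 0) 0 x

-- ===== PORT B =====
-- B's _remove helper: (multiplicity e of p in x, x // p**e) by recursive squaring of p;
-- the dite guard only makes it total (it holds whenever Python recurses inside Pre_)
def pfsRemove (p x : Int) : Int × Int :=
  if PySem.Int.mod x p = 0 then
    if hdec : x.natAbs / (p * p).natAbs < x.natAbs / p.natAbs then
      let r := pfsRemove (p * p) x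
      if PySem.Int.mod r.2 p = 0 then (2 * r.1 + 1, PySem.Int.floordiv r.2 p)
      else (2 * r.1, r.2)
    else (0, x)
  else (0, x)
termination_by x.natAbs / p.natAbs

def prime_factors_sparse_alt (primes : List Int) (x : Int) : List Int :=
  match primes with
  | [] => []
  | p :: rest =>
    let r := pfsRemove p x
    r.1 :: prime_factors_sparse_alt rest r.2

-- ===== PRECONDITION & SPEC =====
-- Pre_ is exactly A's termination domain: A raises ZeroDivisionError on a prime 0 and
-- loops forever on x = 0 (with primes nonempty) or on a prime ±1; it returns elsewhere.
def Pre_prime_factors_sparse (primes : List Int) (x : Int) : Prop :=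
  (x ≠ 0 ∨ primes = []) ∧ ∀ p ∈ primes, 2 ≤ p.natAbs
instance (primes : List Int) (x : Int) : Decidable (Pre_prime_factors_sparse primes x) := by
  unfold Pre_prime_factors_sparse; infer_instance

def pvWitness_prime_factors_sparse : List Int × Int := ([2, 3, 5], 360)

def Spec_prime_factors_sparse (primes : List Int) (x : Int) (out : List Int) : Prop := out = prime_factors_sparse_alt primes x
instance (primes : List Int) (x : Int) (out : List Int) : Decidable (Spec_prime_factors_sparse primes x out) := by unfold Spec_prime_factors_sparse; infer_instance

-- ===== CLAIM (what is proved, stated in full; the proofs are below) =====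
def Claim_equal_prime_factors_sparse : Prop := ∀ (primes : List Int) (x : Int), Dom_prime_factors_sparse primes x → Pre_prime_factors_sparse primes x → Spec_prime_factors_sparse primes x (prime_factors_sparse primes x)

-- ===== LEMMAS AND PROOFS =====

-- exact floor division: (p*c) // p = c for p ≠ 0
theorem pfs_fd {p : Int} (c : Int) (hp0 : p ≠ 0) : PySem.Int.floordiv (p * c) p = c := by
  rcases lt_or_gt_of_ne hp0 with hneg | hpos
  · rw [← PySem.Int.floordiv_neg_neg, PySem.Int.floordiv_eq_ediv_of_pos (by omega),
        show -(p * c) = (-p) * c by ring, Int.mul_ediv_cancel_left _ (by omega : (-p) ≠ (0:Int))]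
  · rw [PySem.Int.floordiv_eq_ediv_of_pos hpos, Int.mul_ediv_cancel_left _ hp0]

-- one division step by a prime-like p strictly shrinks |x| and keeps x ≠ 0
theorem pfs_shrink {p x : Int} (hp : 2 ≤ p.natAbs) (hx : x ≠ 0)
    (hd : PySem.Int.mod x p = 0) :
    (PySem.Int.floordiv x p).natAbs < x.natAbs ∧ PySem.Int.floordiv x p ≠ 0 := by
  have hp0 : p ≠ 0 := by intro h; simp [h] at hp
  have hdvd : p ∣ x := (PySem.Int.mod_eq_zero_iff_dvd x p).1 hd
  rcases hdvd with ⟨c, rfl⟩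
  rw [pfs_fd c hp0]
  have hc : c ≠ 0 := by rintro rfl; simp at hx
  refine ⟨?_, hc⟩
  calc c.natAbs < 2 * c.natAbs := by omega
    _ ≤ p.natAbs * c.natAbs := Nat.mul_le_mul_right _ hp
    _ = (p * c).natAbs := (Int.natAbs_mul p c).symm

-- ghost helper: the sequential exponent extraction A performs at one list position
def pfsCount (p x : Int) : Int × Int :=
  if PySem.Int.mod x p = 0 then
    if hdec : (PySem.Int.floordiv x p).natAbs < x.natAbs then
      let r := pfsCount p (PySem.Int.floordiv x p)
      (r.1 + 1, r.2)
    else (0, x)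
  else (0, x)
termination_by x.natAbs

-- ghost helper: the per-prime sequential pass (A's result, restructured prime by prime)
def pfsAltSeq : List Int → Int → List Int
  | [], _ => []
  | p :: rest, x => (pfsCount p x).1 :: pfsAltSeq rest (pfsCount p x).2

theorem pfsCount_snd_ne_zero {p : Int} (x : Int) (hp : 2 ≤ p.natAbs) (hx : x ≠ 0) :
    (pfsCount p x).2 ≠ 0 := by
  by_cases hd : PySem.Int.mod x p = 0
  · obtain ⟨hdec, hx'⟩ := pfs_shrink hp hx hd
    rw [pfsCount]; simp only [hd, if_pos, hdec, dif_pos]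
    exact pfsCount_snd_ne_zero _ hp hx'
  · rw [pfsCount]; simp [hd, hx]
termination_by x.natAbs
decreasing_by exact hdec

-- sequential counting by p equals one squaring step: count against p*p, then fix up
theorem pfsCount_sq (p x : Int) (hp : 2 ≤ p.natAbs) (hx : x ≠ 0) :
    pfsCount p x =
      (if PySem.Int.mod (pfsCount (p * p) x).2 p = 0
       then (2 * (pfsCount (p * p) x).1 + 1, PySem.Int.floordiv (pfsCount (p * p) x).2 p)
       else (2 * (pfsCount (p * p) x).1, (pfsCount (p * p) x).2)) := by
  have hp0 : p ≠ 0 := by intro h; simp [h] at hp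
  have hpp0 : p * p ≠ 0 := mul_ne_zero hp0 hp0
  by_cases hd : PySem.Int.mod x p = 0
  · have hdvd : p ∣ x := (PySem.Int.mod_eq_zero_iff_dvd x p).1 hd
    rcases hdvd with ⟨c, rfl⟩
    have hc : c ≠ 0 := by rintro rfl; simp at hx
    obtain ⟨hdec1, -⟩ := pfs_shrink hp hx hd
    have hstep1 : pfsCount p (p * c) = ((pfsCount p c).1 + 1, (pfsCount p c).2) := by
      rw [pfsCount]; simp only [hd, if_pos]
      rw [dif_pos hdec1]
      simp [pfs_fd c hp0]
    by_cases hd2 : PySem.Int.mod c p = 0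
    · -- p divides x twice: unfold the sequential count twice and use the IH at x / p²
      have hdvd2 : p ∣ c := (PySem.Int.mod_eq_zero_iff_dvd c p).1 hd2
      rcases hdvd2 with ⟨e, rfl⟩
      have he : e ≠ 0 := by rintro rfl; simp at hc
      obtain ⟨hdec2, -⟩ := pfs_shrink hp hc hd2
      have hstep2 : pfsCount p (p * e) = ((pfsCount p e).1 + 1, (pfsCount p e).2) := by
        rw [pfsCount]; simp only [hd2, if_pos]
        rw [dif_pos hdec2]
        simp [pfs_fd e hp0]
      have hxe : p * (p * e) = (p * p) * e := by ring
      have hdpp : PySem.Int.mod (p * (p * e)) (p * p) = 0 := by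
        rw [PySem.Int.mod_eq_zero_iff_dvd, hxe]; exact Dvd.intro e rfl
      have hdecpp : (PySem.Int.floordiv (p * (p * e)) (p * p)).natAbs < (p * (p * e)).natAbs := by
        rw [hxe, pfs_fd e hpp0]
        have h1 : (p * p * e).natAbs = p.natAbs * (p.natAbs * e.natAbs) := by
          rw [Int.natAbs_mul, Int.natAbs_mul, mul_assoc]
        have he' : 1 ≤ e.natAbs := Int.natAbs_pos.mpr he
        have h2 : 2 ≤ p.natAbs := hp
        have h3 : e.natAbs < p.natAbs * e.natAbs :=
          calc e.natAbs < 2 * e.natAbs := by omega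
            _ ≤ p.natAbs * e.natAbs := Nat.mul_le_mul_right _ h2
        have h4 : p.natAbs * e.natAbs ≤ p.natAbs * (p.natAbs * e.natAbs) :=
          Nat.le_mul_of_pos_left _ (by omega)
        rw [h1]; exact lt_of_lt_of_le h3 h4
      have hsteppp : pfsCount (p * p) (p * (p * e)) =
          ((pfsCount (p * p) e).1 + 1, (pfsCount (p * p) e).2) := by
        rw [pfsCount]; simp only [hdpp, if_pos]
        rw [dif_pos hdecpp]
        simp [hxe, pfs_fd e hpp0]
      have hIH := pfsCount_sq p e hp he
      rw [hstep1, hstep2, hsteppp, hIH]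
      by_cases hy : PySem.Int.mod (pfsCount (p * p) e).2 p = 0 <;> simp [hy] <;> ring
    · -- exactly one factor of p: the squared count finds nothing
      have hstepc : pfsCount p c = (0, c) := by rw [pfsCount]; simp [hd2]
      have hnpp : ¬ PySem.Int.mod (p * c) (p * p) = 0 := by
        rw [PySem.Int.mod_eq_zero_iff_dvd]
        rintro ⟨k, hk⟩
        apply hd2
        rw [PySem.Int.mod_eq_zero_iff_dvd]
        refine ⟨k, ?_⟩
        have : p * c = p * (p * k) := by rw [hk]; ring
        exact mul_left_cancel₀ hp0 this
      have hcpp : pfsCount (p * p) (p * c) = (0, p * c) := by rw [pfsCount]; simp [hnpp]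
      rw [hstep1, hstepc, hcpp]
      simp [hd, pfs_fd c hp0]
  · -- p does not divide x, hence neither does p*p
    have hnpp : ¬ PySem.Int.mod x (p * p) = 0 := by
      rw [PySem.Int.mod_eq_zero_iff_dvd]
      rintro ⟨k, hk⟩
      apply hd
      rw [PySem.Int.mod_eq_zero_iff_dvd]
      exact ⟨p * k, by rw [hk]; ring⟩
    have h1 : pfsCount p x = (0, x) := by rw [pfsCount]; simp [hd]
    have h2 : pfsCount (p * p) x = (0, x) := by rw [pfsCount]; simp [hnpp]
    rw [h1, h2]; simp [hd]
termination_by x.natAbs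
decreasing_by
  subst_vars
  have h2 : 2 ≤ p.natAbs := hp
  have he' : 1 ≤ e.natAbs := Int.natAbs_pos.mpr he
  have h3 : e.natAbs < p.natAbs * e.natAbs :=
    calc e.natAbs < 2 * e.natAbs := by omega
      _ ≤ p.natAbs * e.natAbs := Nat.mul_le_mul_right _ h2
  have h4 : p.natAbs * e.natAbs ≤ p.natAbs * (p.natAbs * e.natAbs) :=
    Nat.le_mul_of_pos_left _ (by omega)
  calc e.natAbs < p.natAbs * e.natAbs := h3
    _ ≤ p.natAbs * (p.natAbs * e.natAbs) := h4
    _ = (p * (p * e)).natAbs := by rw [Int.natAbs_mul, Int.natAbs_mul]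

-- B's squaring extraction computes the same pair as the sequential extraction
theorem pfsRemove_eq_count (p x : Int) (hp : 2 ≤ p.natAbs) (hx : x ≠ 0) :
    pfsRemove p x = pfsCount p x := by
  have hp0 : p ≠ 0 := by intro h; simp [h] at hp
  by_cases hd : PySem.Int.mod x p = 0
  · have hdvd : p ∣ x := (PySem.Int.mod_eq_zero_iff_dvd x p).1 hd
    have hle : p.natAbs ≤ x.natAbs :=
      Nat.le_of_dvd (Int.natAbs_pos.mpr hx) (Int.natAbs_dvd_natAbs.mpr hdvd)
    have hq1 : 1 ≤ x.natAbs / p.natAbs := (Nat.one_le_div_iff (by omega)).mpr hle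
    have hdec : x.natAbs / (p * p).natAbs < x.natAbs / p.natAbs := by
      rw [Int.natAbs_mul, ← Nat.div_div_eq_div_mul]
      exact Nat.div_lt_self (by omega) (by omega)
    have hIH := pfsRemove_eq_count (p * p) x
      (by rw [Int.natAbs_mul]
          calc 2 ≤ p.natAbs := hp
            _ ≤ p.natAbs * p.natAbs := Nat.le_mul_of_pos_left _ (by omega)) hx
    rw [pfsRemove]
    simp only [hd, if_pos, hdec, dif_pos, hIH]
    rw [pfsCount_sq p x hp hx]
  · rw [pfsRemove, pfsCount]; simp [hd]
termination_by x.natAbs / p.natAbs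
decreasing_by exact hdec

-- B's pass equals the sequential per-prime pass
theorem alt_eq_seq (primes : List Int) (x : Int) (hx : x ≠ 0)
    (hp : ∀ p ∈ primes, 2 ≤ p.natAbs) :
    prime_factors_sparse_alt primes x = pfsAltSeq primes x := by
  induction primes generalizing x with
  | nil => rfl
  | cons p rest ih =>
    have hpp := hp p (by simp)
    simp only [prime_factors_sparse_alt, pfsAltSeq, pfsRemove_eq_count p x hpp hx]
    rw [ih _ (pfsCount_snd_ne_zero x hpp hx) (fun q hq => hp q (by simp [hq]))]

theorem pfsLoopA_eq (primes : List Int) (x : Int) (i : Nat) (factors : List Int)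
    (hlen : factors.length = primes.length) (hi : i ≤ primes.length)
    (hx : x ≠ 0) (hp : ∀ p ∈ primes, 2 ≤ p.natAbs) :
    pfsLoopA primes factors i x =
      factors.take i ++
        List.zipWith (· + ·) (factors.drop i) (pfsAltSeq (primes.drop i) x) := by
  by_cases hlt : i < primes.length
  · have hpmem : primes[i] ∈ primes := List.getElem_mem hlt
    have hpi := hp _ hpmem
    have hdropP : primes.drop i = primes[i] :: primes.drop (i + 1) :=
      List.drop_eq_getElem_cons hlt
    have hif : i < factors.length := by omega
    have hdropF : factors.drop i = factors[i] :: factors.drop (i + 1) :=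
      List.drop_eq_getElem_cons hif
    by_cases hd : PySem.Int.mod x primes[i] = 0
    · obtain ⟨hdec, hx'⟩ := pfs_shrink hpi hx hd
      rw [pfsLoopA]
      simp only [hlt, dif_pos, hd, if_pos, hdec, dif_pos]
      rw [pfsLoopA_eq primes (PySem.Int.floordiv x primes[i]) i
        (factors.modify i (· + 1)) (by simpa using hlen) hi hx' hp]
      rw [hdropP]
      have hcnt : pfsCount primes[i] x =
          ((pfsCount primes[i] (PySem.Int.floordiv x primes[i])).1 + 1,
           (pfsCount primes[i] (PySem.Int.floordiv x primes[i])).2) := by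
        rw [pfsCount]; simp [hd, hdec]
      simp only [pfsAltSeq, hcnt]
      have hmt : (factors.modify i (· + 1)).take i = factors.take i := by
        apply List.ext_getElem
        · simp
        · intro n h1 h2
          simp only [List.getElem_take, List.getElem_modify]
          rw [if_neg (by simp at h1; omega)]
      have hmd : (factors.modify i (· + 1)).drop i =
          (factors[i] + 1) :: factors.drop (i + 1) := by
        rw [List.drop_eq_getElem_cons (by simpa using hif)]
        congr 1
        · rw [List.getElem_modify]; simp
        · apply List.ext_getElem
          · simp
          · intro n h1 h2
            simp only [List.getElem_drop, List.getElem_modify]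
            rw [if_neg (by omega)]
      rw [hmt, hmd, hdropF]
      simp only [List.zipWith_cons_cons]
      congr 2
      ring
    · rw [pfsLoopA]
      simp only [hlt, dif_pos, hd, if_neg, not_false_iff]
      rw [pfsLoopA_eq primes x (i + 1) factors hlen (by omega) hx hp]
      rw [hdropP]
      have hcnt : pfsCount primes[i] x = (0, x) := by rw [pfsCount]; simp [hd]
      simp only [pfsAltSeq, hcnt]
      rw [hdropF, List.zipWith_cons_cons,
          show List.take (i+1) factors = List.take i factors ++ [factors[i]] from by
            rw [List.take_add_one]; simp [List.getElem?_eq_getElem hif]]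
      rw [List.append_assoc, List.singleton_append, add_zero]
  · have hieq : i = primes.length := by omega
    rw [pfsLoopA, dif_neg hlt, hieq, List.drop_length,
        List.take_of_length_le (le_of_eq hlen),
        show factors.drop primes.length = [] by rw [← hlen]; simp]
    simp [pfsAltSeq]
termination_by (primes.length - i) + x.natAbs
decreasing_by all_goals omega

theorem pfs_seq_length (primes : List Int) (x : Int) :
    (pfsAltSeq primes x).length = primes.length := by
  induction primes generalizing x with
  | nil => simp [pfsAltSeq]
  | cons p rest ih => simp [pfsAltSeq, ih]

-- ===== VERDICT (by name: the statement is the Claim_ definition above) =====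
theorem prime_factors_sparse_spec : Claim_equal_prime_factors_sparse := by
  intro primes x _ hpre
  obtain ⟨hx0, hp⟩ := hpre
  unfold Spec_prime_factors_sparse prime_factors_sparse
  rcases hx0 with hx | rfl
  · rw [pfsLoopA_eq primes x 0 _ (by simp) (by omega) hx hp,
        alt_eq_seq primes x hx hp]
    simp only [List.take_zero, List.drop_zero, List.nil_append]
    apply List.ext_getElem
    · simp [pfs_seq_length]
    · intro n h1 h2
      simp [List.getElem_zipWith, List.getElem_replicate]
  · rw [pfsLoopA]
    simp [prime_factors_sparse_alt]
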